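-- pv_equiv track=rewrite | github.com/grozaqueen/KotyariAnalytics | app/grpc_server.py | pick_title
-- ===== SOURCE A (Python) =====
-- def pick_title(text: str) -> str:
--     if not text:
--         return ""
--
--     lines = text.splitlines()
--
--     paragraphs: list[list[str]] = []
--     current: list[str] = []
--
--     for line in lines:
--         if line.strip():
--             current.append(line.strip())
--         else:
--             if current:
--                 paragraphs.append(current)
--                 current = []
--
--     if current:
--         paragraphs.append(current)
--
--     if not paragraphs:
--         return ""
--
--     first_paragraph = " ".join(paragraphs[0])
--     return first_paragraph.replace("#", "")
-- ===== SOURCE B (Python) =====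
-- def _drop_blank(lines):
--     return _drop_blank(lines[1:]) if lines and not lines[0] else lines
--
--
-- def _take_para(lines):
--     return [lines[0]] + _take_para(lines[1:]) if lines and lines[0] else []
--
--
-- def pick_title(text: str) -> str:
--     stripped = [l.strip() for l in text.splitlines()]
--     return " ".join(_take_para(_drop_blank(stripped))).replace("#", "")
-- ===== Notes on version B (the rewrite author's own statement) =====
-- stated objective: simpler
-- what changed: Instead of accumulating every paragraph with a stateful paragraphs/current fold, B strips all lines, recursively drops the leading blank lines and takes the first run of non-empty lines, joining only that run; the empty-text guard and the full paragraph list disappear.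
import Mathlib
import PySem

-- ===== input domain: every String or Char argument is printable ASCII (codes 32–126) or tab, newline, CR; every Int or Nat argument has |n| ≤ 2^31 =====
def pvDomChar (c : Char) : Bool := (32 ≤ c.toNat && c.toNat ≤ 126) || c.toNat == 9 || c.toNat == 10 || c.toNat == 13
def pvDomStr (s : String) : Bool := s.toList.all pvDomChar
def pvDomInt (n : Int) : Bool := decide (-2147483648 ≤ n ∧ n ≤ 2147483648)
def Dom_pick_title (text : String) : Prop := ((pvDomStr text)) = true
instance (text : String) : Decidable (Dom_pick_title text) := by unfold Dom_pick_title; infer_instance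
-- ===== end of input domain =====

-- B replaces A's stateful paragraphs/current fold by drop-leading-blanks + take-first-run over stripped lines (simpler decomposition; return value only, no side effects involved).

-- ===== PORT A =====
def pickStep (st : List (List String) × List String) (line : String) : List (List String) × List String :=
  if PySem.Str.strip line ≠ "" then (st.1, st.2 ++ [PySem.Str.strip line])
  else if st.2 ≠ [] then (st.1 ++ [st.2], ([] : List String))
  else st

def pick_title (text : String) : String :=
  if text = "" then ""
  else
    let lines := PySem.Str.splitlines text
    let st := lines.foldl pickStep ([], [])
    let paragraphs := if st.2 ≠ [] then st.1 ++ [st.2] else st.1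
    match paragraphs with
    | [] => ""
    | p :: _ => PySem.Str.replace (PySem.Str.join " " p) "#" ""

-- ===== PORT B =====
def dropBlank : List String → List String
  | [] => []
  | l :: ls => if l = "" then dropBlank ls else l :: ls

def takePara : List String → List String
  | [] => []
  | l :: ls => if l ≠ "" then l :: takePara ls else []

def pick_title_alt (text : String) : String :=
  let stripped := (PySem.Str.splitlines text).map PySem.Str.strip
  PySem.Str.replace (PySem.Str.join " " (takePara (dropBlank stripped))) "#" ""

-- ===== PRECONDITION & SPEC =====
def Spec_pick_title (text : String) (out : String) : Prop := out = pick_title_alt text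
instance (text : String) (out : String) : Decidable (Spec_pick_title text out) := by unfold Spec_pick_title; infer_instance

-- ===== CLAIM (what is proved, stated in full; the proofs are below) =====
def Claim_equal_pick_title : Prop := ∀ (text : String), Dom_pick_title text → Spec_pick_title text (pick_title text)

-- ===== LEMMAS AND PROOFS =====

-- first paragraph of A's final state
def firstOf (st : List (List String) × List String) : List String :=
  match (if st.2 ≠ [] then st.1 ++ [st.2] else st.1) with
  | [] => []
  | p :: _ => p

theorem firstOf_fold_cons (cs : List String) (p : List String) :
    ∀ (ps : List (List String)) (C : List String),
      firstOf (cs.foldl pickStep (p :: ps, C)) = p := by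
  induction cs with
  | nil =>
    intro ps C
    by_cases hC : C = [] <;> simp [firstOf, hC]
  | cons l cs ih =>
    intro ps C
    simp only [List.foldl_cons, pickStep]
    split
    · exact ih ps (C ++ [PySem.Str.strip l])
    · split
      · exact ih (ps ++ [C]) []
      · exact ih ps C

theorem firstOf_fold_cur (cs : List String) :
    ∀ (C : List String), C ≠ [] →
      firstOf (cs.foldl pickStep ([], C)) = C ++ takePara (cs.map PySem.Str.strip) := by
  induction cs with
  | nil =>
    intro C hC
    simp only [List.foldl_nil, firstOf, List.map_nil, takePara, List.append_nil]
    simp [hC]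
  | cons l cs ih =>
    intro C hC
    simp only [List.foldl_cons, pickStep, List.map_cons]
    by_cases hs : PySem.Str.strip l = ""
    · simp only [hs, ne_eq, not_true_eq_false, if_false, hC, if_true, takePara,
        not_false_eq_true, List.append_nil]
      have := firstOf_fold_cons cs C [] []
      simpa [hC] using this
    · simp only [hs, ne_eq, not_false_eq_true, if_true, takePara]
      rw [ih (C ++ [PySem.Str.strip l]) (by simp)]
      simp

theorem firstOf_fold_nil (cs : List String) :
    firstOf (cs.foldl pickStep ([], [])) = takePara (dropBlank (cs.map PySem.Str.strip)) := by
  induction cs with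
  | nil => rfl
  | cons l cs ih =>
    simp only [List.foldl_cons, pickStep, List.map_cons]
    by_cases hs : PySem.Str.strip l = ""
    · simpa [hs, dropBlank] using ih
    · simp only [hs, ne_eq, not_false_eq_true, if_true, List.nil_append, dropBlank]
      rw [firstOf_fold_cur cs [PySem.Str.strip l] (by simp)]
      simp [takePara, hs]

theorem join_firstOf (st : List (List String) × List String) :
    (match (if st.2 ≠ [] then st.1 ++ [st.2] else st.1) with
      | [] => ""
      | p :: _ => PySem.Str.replace (PySem.Str.join " " p) "#" "")
    = PySem.Str.replace (PySem.Str.join " " (firstOf st)) "#" "" := by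
  unfold firstOf
  split
  · decide
  · rfl

-- ===== VERDICT (by name: the statement is the Claim_ definition above) =====
theorem pick_title_spec : Claim_equal_pick_title := by
  intro text _
  unfold Spec_pick_title pick_title pick_title_alt
  by_cases h : text = ""
  · subst h; decide
  · simp only [h, if_false]
    rw [join_firstOf, firstOf_fold_nil]
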